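-- pv_equiv track=rewrite | github.com/Haotianz94/video-analysis | scripts/topic_assign.py | count_name
-- ===== SOURCE A (Python) =====
-- def count_name(text, name):
--     cnt = 0
--     start = -1
--     ln = len(name)
--     while True:
--         start = text.find(name, start + 1)
--         if start == -1:
--             break
--         else:
--             if start+ln < len(text) and text[start+ln] != ':' and not text[start+ln].isalpha():
--                 cnt += 1
--             elif start+ln == len(text):
--                 cnt += 1
--     return cnt
-- ===== SOURCE B (Python) =====
-- def count_name(text, name):
--     ln, L = len(name), len(text)
--     if ln == 0:
--         # every position matches the empty pattern; classify the following char
--         cnt = 0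
--         for i in range(L + 1):
--             if i == L or (text[i] != ':' and not text[i].isalpha()):
--                 cnt += 1
--         return cnt
--     if ln > L:
--         return 0
--     B = 1114112               # > any Unicode code point
--     P = 2305843009213693951   # 2**61 - 1 (prime)
--     hn = 0
--     for c in name:
--         hn = (hn * B + ord(c)) % P
--     h = 0
--     for c in text[:ln]:
--         h = (h * B + ord(c)) % P
--     pw = pow(B, ln - 1, P)
--     cnt = 0
--     for i in range(L - ln + 1):
--         if h == hn and text[i:i + ln] == name:
--             j = i + ln
--             if j == L or (text[j] != ':' and not text[j].isalpha()):
--                 cnt += 1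
--         if i + ln < L:
--             h = ((h - ord(text[i]) * pw) * B + ord(text[i + ln])) % P
--     return cnt
-- ===== Notes on version B (the rewrite author's own statement) =====
-- stated objective: alternative
-- what changed: Replaces the while/str.find search-and-check loop by classic Rabin-Karp: a polynomial rolling hash mod 2^61-1 is slid across the text in O(1) per position, candidate windows (hash equal to the pattern's hash) are confirmed by one direct slice comparison, and confirmed windows are classified by the following character; empty pattern handled by a direct positional count.
import Mathlib
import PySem

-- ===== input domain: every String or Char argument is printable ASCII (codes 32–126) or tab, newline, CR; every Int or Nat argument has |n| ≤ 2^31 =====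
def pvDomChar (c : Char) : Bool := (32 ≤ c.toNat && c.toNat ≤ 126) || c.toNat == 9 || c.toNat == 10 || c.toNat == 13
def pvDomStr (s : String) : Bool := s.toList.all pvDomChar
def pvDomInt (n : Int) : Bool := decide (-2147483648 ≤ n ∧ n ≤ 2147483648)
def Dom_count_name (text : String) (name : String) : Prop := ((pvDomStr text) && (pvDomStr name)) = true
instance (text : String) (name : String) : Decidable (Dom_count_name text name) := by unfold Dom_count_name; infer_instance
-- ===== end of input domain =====

-- B replaces A's while/str.find search-and-check loop by classic Rabin-Karp: a polynomial
-- rolling hash mod 2^61-1 slid across the text, candidate windows confirmed by one direct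
-- slice comparison; objective: alternative algorithm, same counting behaviour.

-- ===== PORT A =====
-- A's `while True:` loop: each round does start = text.find(name, start+1); the state carried
-- between rounds is the next search start (Python's start+1, always ≥ 0) and cnt.  The loop
-- runs at most len(text)+2 rounds (each successful find strictly increases the search start,
-- which stays ≤ len(text)+1), so fuel = len(text)+2 makes the recursion total without changing
-- what any reachable round computes.  text[start+ln] is guarded by start+ln < len(text), so
-- getD is exact there.
def countGoA (t n : List Char) (fuel : Nat) (s : Nat) (cnt : Int) : Int :=
  match fuel with
  | 0 => cnt
  | fuel + 1 =>
    let start := PySem.Chars.findFrom t n (s : Int) none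
    if start = -1 then cnt
    else
      let j := start.toNat + n.length
      let cnt' :=
        if j < t.length ∧ t.getD j ' ' ≠ ':' ∧ PySem.Chars.isalpha (t.getD j ' ') = false then
          cnt + 1
        else if j = t.length then cnt + 1
        else cnt
      countGoA t n fuel (start.toNat + 1) cnt'

def count_name (text : String) (name : String) : Int :=
  countGoA text.toList name.toList (text.toList.length + 2) 0 0

-- ===== PORT B =====
-- Source B, Rabin-Karp: (h*B + ord(c)) % P is pvHashStep; pow(B, ln-1, P) is ported as its value
-- (1114112 ^ (ln-1)) % P; the slice comparison text[i:i+ln] == name (0 ≤ i ≤ i+ln ≤ L, so the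
-- slice is exactly take/drop) is the window test; the main fold over range(L-ln+1) carries the
-- pair (rolling hash of the current window, cnt), exactly Source B's two loop variables.  Every
-- text[...] access is guarded by its branch (i < L and i+ln < L where used), so getD is exact.
def pvHashStep (h : Int) (c : Char) : Int :=
  (h * 1114112 + (c.toNat : Int)) % 2305843009213693951

def count_name_alt (text : String) (name : String) : Int :=
  let t := text.toList
  let n := name.toList
  let ln := n.length
  let L := t.length
  if ln = 0 then
    (List.range (L + 1)).foldl (fun cnt i =>
      if i = L ∨ (t.getD i ' ' ≠ ':' ∧ PySem.Chars.isalpha (t.getD i ' ') = false)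
      then cnt + 1 else cnt) 0
  else if L < ln then 0
  else
    let hn : Int := n.foldl pvHashStep 0
    let h0 : Int := (t.take ln).foldl pvHashStep 0
    let pw : Int := ((1114112 : Int) ^ (ln - 1)) % 2305843009213693951
    ((List.range (L - ln + 1)).foldl (fun (st : Int × Int) i =>
      let cnt' :=
        if st.1 = hn ∧ (t.drop i).take ln = n then
          if i + ln = L ∨ (t.getD (i + ln) ' ' ≠ ':' ∧ PySem.Chars.isalpha (t.getD (i + ln) ' ') = false)
          then st.2 + 1 else st.2
        else st.2
      let h' :=
        if i + ln < L then
          ((st.1 - ((t.getD i ' ').toNat : Int) * pw) * 1114112 + ((t.getD (i + ln) ' ').toNat : Int))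
            % 2305843009213693951
        else st.1
      (h', cnt')) (h0, 0)).2

-- ===== PRECONDITION & SPEC =====
def Spec_count_name (text : String) (name : String) (out : Int) : Prop := out = count_name_alt text name
instance (text : String) (name : String) (out : Int) : Decidable (Spec_count_name text name out) := by unfold Spec_count_name; infer_instance

-- ===== CLAIM (what is proved, stated in full; the proofs are below) =====
def Claim_equal_count_name : Prop := ∀ (text : String) (name : String), Dom_count_name text name → Spec_count_name text name (count_name text name)

-- ===== LEMMAS AND PROOFS =====

-- contribution of one position i to the count (shared characterisation of both ports)
def incB (t n : List Char) (i : Nat) : Int :=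
  if PySem.Chars.startswith (t.drop i) n then
    if i + n.length = t.length then 1
    else if t.getD (i + n.length) ' ' ≠ ':' ∧
            PySem.Chars.isalpha (t.getD (i + n.length) ' ') = false then 1
    else 0
  else 0

lemma incB_eq_zero (t n : List Char) (i : Nat)
    (h : ¬ n <+: t.drop i) : incB t n i = 0 := by
  unfold incB
  rw [if_neg]
  simp [PySem.Chars.startswith_iff, h]

-- ---------- A's port = ∑ incB over range(len(text)+1) ----------

lemma findFrom_len_succ (t n : List Char) :
    PySem.Chars.findFrom t n ((t.length : Int) + 1) none = -1 := by
  simp only [PySem.Chars.findFrom]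
  split_ifs <;> first | rfl | omega

lemma incA_eq (t n : List Char) (i : Nat) (cnt : Int)
    (hsw : PySem.Chars.startswith (t.drop i) n = true)
    (hle : i + n.length ≤ t.length) :
    (if i + n.length < t.length ∧ t.getD (i + n.length) ' ' ≠ ':' ∧
        PySem.Chars.isalpha (t.getD (i + n.length) ' ') = false then cnt + 1
     else if i + n.length = t.length then cnt + 1
     else cnt)
    = cnt + incB t n i := by
  by_cases hj : i + n.length = t.length
  · simp [incB, hsw, hj]
  · have hlt : i + n.length < t.length := by omega
    simp only [incB, hsw, if_true, hj, if_false, hlt, true_and]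
    split_ifs <;> ring

lemma goA_sum (t n : List Char) :
    ∀ (fuel s : Nat) (cnt : Int), s ≤ t.length + 1 → t.length + 1 - s < fuel →
      countGoA t n fuel s cnt = cnt + ∑ i ∈ Finset.Ico s (t.length + 1), incB t n i := by
  intro fuel
  induction fuel with
  | zero => intro s cnt _ h; exact absurd h (Nat.not_lt_zero _)
  | succ fuel ih =>
    intro s cnt hs hfuel
    by_cases hsl : s = t.length + 1
    · subst hsl
      rw [countGoA]
      simp only
      rw [if_pos (by push_cast; exact findFrom_len_succ t n)]
      simp
    · have hsL : s ≤ t.length := by omega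
      rw [countGoA]
      simp only
      by_cases hneg : PySem.Chars.findFrom t n (s : Int) none = -1
      · rw [if_pos hneg]
        have hno : ¬ n <:+: t.drop s :=
          (PySem.Chars.findFrom_natCast_eq_neg_one_iff t n s hsL).mp hneg
        have hz : ∀ i ∈ Finset.Ico s (t.length + 1), incB t n i = 0 := by
          intro i hi
          apply incB_eq_zero
          intro hpre
          apply hno
          have hsi : s ≤ i := (Finset.mem_Ico.mp hi).1
          have hdd : t.drop i = (t.drop s).drop (i - s) := by
            rw [List.drop_drop]; congr 1; omega
          rw [hdd] at hpre
          exact hpre.isInfix.trans (List.drop_suffix _ _).isInfix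
        rw [Finset.sum_eq_zero hz]; ring
      · set r := PySem.Chars.findFrom t n (s : Int) none with hrdef
        rw [if_neg hneg]
        have hform := PySem.Chars.findFrom_natCast t n s hsL
        have hfne : PySem.Chars.find (t.drop s) n ≠ -1 := by
          intro h
          apply hneg
          rw [hrdef, hform, if_pos h]
        have hf0 : 0 ≤ PySem.Chars.find (t.drop s) n := by
          have := PySem.Chars.neg_one_le_find (t.drop s) n; omega
        have hfle : PySem.Chars.find (t.drop s) n ≤ (t.drop s).length :=
          PySem.Chars.find_le_length _ _
        have hrval : r = (s : Int) + PySem.Chars.find (t.drop s) n := by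
          rw [hrdef, hform, if_neg hfne]
        have hlen : (t.drop s).length = t.length - s := List.length_drop ..
        have hrle : r.toNat ≤ t.length := by
          rw [hlen] at hfle; rw [hrval]; omega
        have hrge : s ≤ r.toNat := by rw [hrval]; omega
        have hspec := PySem.Chars.findFrom_natCast_spec t n s hsL hneg
        rw [← hrdef] at hspec
        have hpre : n <+: t.drop r.toNat := hspec.2.1
        have hnomid : ∀ i, s ≤ i → i < r.toNat → ¬ n <+: t.drop i := hspec.2.2
        have hjle : r.toNat + n.length ≤ t.length := by
          have := hpre.length_le
          rw [List.length_drop] at this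
          omega
        have hsplit : ∑ i ∈ Finset.Ico s (t.length + 1), incB t n i
            = ∑ i ∈ Finset.Ico s r.toNat, incB t n i
              + ∑ i ∈ Finset.Ico r.toNat (t.length + 1), incB t n i :=
          (Finset.sum_Ico_consecutive _ hrge (by omega)).symm
        have hzero : ∑ i ∈ Finset.Ico s r.toNat, incB t n i = 0 :=
          Finset.sum_eq_zero (fun i hi => by
            have hm := Finset.mem_Ico.mp hi
            exact incB_eq_zero t n i (hnomid i hm.1 hm.2))
        have hbot : ∑ i ∈ Finset.Ico r.toNat (t.length + 1), incB t n i
            = incB t n r.toNat + ∑ i ∈ Finset.Ico (r.toNat + 1) (t.length + 1), incB t n i :=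
          Finset.sum_eq_sum_Ico_succ_bot (by omega) _
        have hsw : PySem.Chars.startswith (t.drop r.toNat) n = true :=
          (PySem.Chars.startswith_iff _ _).mpr hpre
        rw [ih (r.toNat + 1) _ (by omega) (by omega), hsplit, hzero, hbot,
          incA_eq t n r.toNat cnt hsw hjle]
        ring

-- ---------- the exact polynomial hash (proof device) and its mod-P computation ----------

def rawStep (h : Int) (c : Char) : Int := h * 1114112 + (c.toNat : Int)

def hashCs (cs : List Char) : Int := cs.foldl rawStep 0

lemma hash_foldl_acc (xs : List Char) : ∀ (a : Int),
    xs.foldl rawStep a = a * (1114112 : Int) ^ xs.length + hashCs xs := by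
  induction xs with
  | nil =>
    intro a
    simp only [hashCs, List.foldl_nil, List.length_nil, pow_zero, mul_one, add_zero]
  | cons c xs ih =>
    intro a
    have h2 : hashCs (c :: xs) = rawStep 0 c * (1114112 : Int) ^ xs.length + hashCs xs := by
      show (c :: xs).foldl rawStep 0 = _
      rw [List.foldl_cons, ih]
    rw [List.foldl_cons, ih, h2, List.length_cons]
    simp only [rawStep]
    ring

lemma hash_cons (c : Char) (xs : List Char) :
    hashCs (c :: xs) = (c.toNat : Int) * (1114112 : Int) ^ xs.length + hashCs xs := by
  simp only [hashCs, List.foldl_cons, rawStep]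
  rw [← hashCs, hash_foldl_acc]
  ring

lemma hash_append_one (xs : List Char) (c : Char) :
    hashCs (xs ++ [c]) = hashCs xs * 1114112 + (c.toNat : Int) := by
  simp only [hashCs, List.foldl_append, List.foldl_cons, List.foldl_nil, rawStep]

-- (x % P * y + z) % P = (x * y + z) % P
lemma mod_absorb (x y z : Int) :
    (x % 2305843009213693951 * y + z) % 2305843009213693951
      = (x * y + z) % 2305843009213693951 := by
  have h1 : x % 2305843009213693951 ≡ x [ZMOD 2305843009213693951] :=
    Int.emod_emod_of_dvd x dvd_rfl
  exact (h1.mul (Int.ModEq.refl y)).add (Int.ModEq.refl z)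

-- the mod-P folded hash is the exact hash mod P
lemma foldl_mod (xs : List Char) : ∀ (a : Int),
    xs.foldl pvHashStep (a % 2305843009213693951)
      = (xs.foldl rawStep a) % 2305843009213693951 := by
  induction xs with
  | nil => intro a; simp
  | cons c xs ih =>
    intro a
    rw [List.foldl_cons, List.foldl_cons]
    have : pvHashStep (a % 2305843009213693951) c = rawStep a c % 2305843009213693951 := by
      simp only [pvHashStep, rawStep]
      exact mod_absorb a 1114112 (c.toNat : Int)
    rw [this, ih]

lemma foldl_mod_zero (xs : List Char) :
    xs.foldl pvHashStep 0 = hashCs xs % 2305843009213693951 := by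
  have := foldl_mod xs 0
  simpa [hashCs] using this

-- congruence used for the rolling-hash slide
lemma mod_absorb2 (H o Q d : Int) :
    ((H % 2305843009213693951 - o * (Q % 2305843009213693951)) * 1114112 + d)
        % 2305843009213693951
      = ((H - o * Q) * 1114112 + d) % 2305843009213693951 := by
  have h1 : H % 2305843009213693951 ≡ H [ZMOD 2305843009213693951] :=
    Int.emod_emod_of_dvd H dvd_rfl
  have h2 : Q % 2305843009213693951 ≡ Q [ZMOD 2305843009213693951] :=
    Int.emod_emod_of_dvd Q dvd_rfl
  exact (((h1.sub ((Int.ModEq.refl o).mul h2)).mul (Int.ModEq.refl 1114112)).add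
    (Int.ModEq.refl d))

-- ---------- windows ----------

def winCs (t n : List Char) (i : Nat) : List Char := (t.drop i).take n.length

lemma win_eq_iff (t n : List Char) (i : Nat) :
    winCs t n i = n ↔ PySem.Chars.startswith (t.drop i) n = true := by
  rw [PySem.Chars.startswith_iff]
  constructor
  · intro hw
    rw [← hw]
    exact List.take_prefix _ _
  · intro hpre
    unfold winCs
    rw [← List.prefix_iff_eq_take.mp hpre]

lemma win_slide (t n : List Char) (i : Nat) (hn : 1 ≤ n.length)
    (h : i + n.length < t.length) :
    winCs t n i = t.getD i ' ' :: (t.drop (i + 1)).take (n.length - 1) ∧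
    winCs t n (i + 1) = (t.drop (i + 1)).take (n.length - 1) ++ [t.getD (i + n.length) ' '] := by
  have hi : i < t.length := by omega
  constructor
  · unfold winCs
    rw [List.drop_eq_getElem_cons hi, List.getD_eq_getElem t ' ' hi]
    conv_lhs => rw [show n.length = (n.length - 1) + 1 from by omega]
    rw [List.take_succ_cons]
  · unfold winCs
    have hdl : (t.drop (i + 1)).length = t.length - (i + 1) := List.length_drop ..
    have hlt : n.length - 1 < (t.drop (i + 1)).length := by omega
    conv_lhs => rw [show n.length = (n.length - 1) + 1 from by omega]
    rw [List.take_add_one, List.getElem?_eq_getElem hlt]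
    congr 1
    rw [List.getD_eq_getElem t ' ' (show i + n.length < t.length from h), List.getElem_drop]
    have hidx : i + 1 + (n.length - 1) = i + n.length := by omega
    simp only [hidx, Option.toList_some]

lemma hash_win_slide (t n : List Char) (i : Nat) (hn : 1 ≤ n.length)
    (h : i + n.length < t.length) :
    hashCs (winCs t n (i + 1))
      = (hashCs (winCs t n i) - ((t.getD i ' ').toNat : Int) * (1114112 : Int) ^ (n.length - 1)) * 1114112
        + ((t.getD (i + n.length) ' ').toNat : Int) := by
  obtain ⟨h1, h2⟩ := win_slide t n i hn h
  have hmidlen : ((t.drop (i + 1)).take (n.length - 1)).length = n.length - 1 := by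
    rw [List.length_take, List.length_drop]; omega
  rw [h1, h2, hash_append_one, hash_cons, hmidlen]
  ring

-- incB written with B's single disjunctive branch
lemma incB_or (t n : List Char) (i : Nat) (c : Int)
    (hsw : PySem.Chars.startswith (t.drop i) n = true) :
    (if i + n.length = t.length ∨ (t.getD (i + n.length) ' ' ≠ ':' ∧
        PySem.Chars.isalpha (t.getD (i + n.length) ' ') = false) then c + 1 else c)
      = c + incB t n i := by
  unfold incB
  rw [if_pos hsw]
  by_cases h1 : i + n.length = t.length
  · simp [h1]
  · simp only [h1, false_or, if_false]
    split_ifs <;> ring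

-- B's main fold: invariant = (exact window hash mod P, partial count)
lemma loopB_inv (t n : List Char) (hn1 : 1 ≤ n.length) (hnL : n.length ≤ t.length) :
    ∀ (k i0 : Nat) (c : Int), i0 + k ≤ t.length - n.length + 1 →
      ((List.range' i0 k).foldl (fun (st : Int × Int) i =>
        let cnt' :=
          if st.1 = hashCs n % 2305843009213693951 ∧ (t.drop i).take n.length = n then
            if i + n.length = t.length ∨ (t.getD (i + n.length) ' ' ≠ ':' ∧
                PySem.Chars.isalpha (t.getD (i + n.length) ' ') = false)
            then st.2 + 1 else st.2
          else st.2
        let h' :=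
          if i + n.length < t.length then
            ((st.1 - ((t.getD i ' ').toNat : Int)
                * ((1114112 : Int) ^ (n.length - 1) % 2305843009213693951)) * 1114112
              + ((t.getD (i + n.length) ' ').toNat : Int)) % 2305843009213693951
          else st.1
        (h', cnt')) (hashCs (winCs t n i0) % 2305843009213693951, c)).2
      = c + ∑ i ∈ Finset.Ico i0 (i0 + k), incB t n i := by
  intro k
  induction k with
  | zero => intro i0 c _; simp
  | succ k ih =>
    intro i0 c hk
    rw [List.range'_succ, List.foldl_cons]
    have hi0 : i0 + n.length ≤ t.length := by omega
    have hcnt : (if hashCs (winCs t n i0) % 2305843009213693951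
            = hashCs n % 2305843009213693951 ∧ (t.drop i0).take n.length = n then
          if i0 + n.length = t.length ∨ (t.getD (i0 + n.length) ' ' ≠ ':' ∧
              PySem.Chars.isalpha (t.getD (i0 + n.length) ' ') = false)
          then c + 1 else c
        else c) = c + incB t n i0 := by
      by_cases hw : (t.drop i0).take n.length = n
      · have hsw : PySem.Chars.startswith (t.drop i0) n = true :=
          (win_eq_iff t n i0).mp hw
        have hmod : hashCs (winCs t n i0) % 2305843009213693951
            = hashCs n % 2305843009213693951 := by
          unfold winCs; rw [hw]
        rw [if_pos ⟨hmod, hw⟩]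
        exact incB_or t n i0 c hsw
      · rw [if_neg (fun hc => hw hc.2)]
        have hns : ¬ n <+: t.drop i0 := fun hp => hw ((win_eq_iff t n i0).mpr
          ((PySem.Chars.startswith_iff _ _).mpr hp))
        rw [incB_eq_zero t n i0 hns]
        ring
    by_cases hlt : i0 + n.length < t.length
    · simp only [hcnt, if_pos hlt]
      have hslide : ((hashCs (winCs t n i0) % 2305843009213693951
            - ((t.getD i0 ' ').toNat : Int)
                * ((1114112 : Int) ^ (n.length - 1) % 2305843009213693951)) * 1114112
          + ((t.getD (i0 + n.length) ' ').toNat : Int)) % 2305843009213693951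
          = hashCs (winCs t n (i0 + 1)) % 2305843009213693951 := by
        rw [mod_absorb2, ← hash_win_slide t n i0 hn1 hlt]
      rw [hslide, ih (i0 + 1) (c + incB t n i0) (by omega)]
      rw [Finset.sum_eq_sum_Ico_succ_bot (a := i0) (by omega) _]
      have : i0 + 1 + k = i0 + (k + 1) := by omega
      rw [← this]
      ring
    · -- i0 = t.length - n.length, so k = 0 and the remaining range is empty
      have hk0 : k = 0 := by omega
      subst hk0
      simp only [List.range'_zero, List.foldl_nil, hcnt]
      rw [Finset.sum_eq_sum_Ico_succ_bot (a := i0) (by omega) _]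
      simp

-- generic: a counting foldl over range m is a sum
lemma foldl_range_sum (f : Nat → Int) (g : Int → Nat → Int)
    (hg : ∀ c i, g c i = c + f i) :
    ∀ (m : Nat) (c : Int), (List.range m).foldl g c = c + ∑ i ∈ Finset.range m, f i := by
  intro m
  induction m with
  | zero => intro c; simp
  | succ m ih =>
    intro c
    rw [List.range_succ, List.foldl_append, List.foldl_cons, List.foldl_nil,
      Finset.sum_range_succ, ih, hg]
    ring

lemma alt_eq_sum (text name : String) :
    count_name_alt text name
      = ∑ i ∈ Finset.Ico 0 (text.toList.length + 1), incB text.toList name.toList i := by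
  unfold count_name_alt
  dsimp only
  generalize text.toList = t
  generalize name.toList = n
  by_cases h0 : n.length = 0
  · rw [if_pos h0]
    have hnil : n = [] := List.length_eq_zero_iff.mp h0
    subst hnil
    rw [foldl_range_sum (incB t []) _ (fun c i => by
      by_cases hc : i = t.length ∨ (t.getD i ' ' ≠ ':' ∧
          PySem.Chars.isalpha (t.getD i ' ') = false)
      · rw [if_pos hc]
        have hsw : PySem.Chars.startswith (t.drop i) [] = true :=
          (PySem.Chars.startswith_iff _ _).mpr (List.nil_prefix)
        have := incB_or t [] i c hsw
        simp only [List.length_nil, Nat.add_zero] at this ⊢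
        rw [← this, if_pos hc]
      · rw [if_neg hc]
        unfold incB
        simp only [List.length_nil, Nat.add_zero]
        push_neg at hc
        rw [if_pos ((PySem.Chars.startswith_iff _ _).mpr List.nil_prefix),
          if_neg hc.1, if_neg (by intro hh; exact absurd hh.2 (by simpa using hc.2 hh.1))]
        ring)]
    rw [Finset.range_eq_Ico]
    ring
  · rw [if_neg h0]
    by_cases hL : t.length < n.length
    · rw [if_pos hL]
      symm
      apply Finset.sum_eq_zero
      intro i hi
      apply incB_eq_zero
      intro hp
      have := hp.length_le
      rw [List.length_drop] at this
      omega
    · rw [if_neg hL]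
      have hn1 : 1 ≤ n.length := by omega
      have hnL : n.length ≤ t.length := by omega
      have hwin0 : (t.take n.length).foldl pvHashStep 0
          = hashCs (winCs t n 0) % 2305843009213693951 := by
        rw [foldl_mod_zero]
        simp only [winCs, List.drop_zero]
      rw [List.range_eq_range', hwin0, foldl_mod_zero n,
        loopB_inv t n hn1 hnL (t.length - n.length + 1) 0 0 (by omega)]
      rw [Nat.zero_add]
      have hsplit : ∑ i ∈ Finset.Ico 0 (t.length + 1), incB t n i
          = ∑ i ∈ Finset.Ico 0 (t.length - n.length + 1), incB t n i
            + ∑ i ∈ Finset.Ico (t.length - n.length + 1) (t.length + 1), incB t n i :=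
        (Finset.sum_Ico_consecutive _ (by omega) (by omega)).symm
      have hz : ∑ i ∈ Finset.Ico (t.length - n.length + 1) (t.length + 1), incB t n i = 0 :=
        Finset.sum_eq_zero (fun i hi => by
          have hm := Finset.mem_Ico.mp hi
          apply incB_eq_zero
          intro hp
          have := hp.length_le
          rw [List.length_drop] at this
          omega)
      rw [hsplit, hz]
      ring

-- ===== VERDICT (by name: the statement is the Claim_ definition above) =====
theorem count_name_spec : Claim_equal_count_name := by
  intro text name _
  unfold Spec_count_name count_name
  rw [goA_sum text.toList name.toList (text.toList.length + 2) 0 0 (by omega) (by omega),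
    alt_eq_sum text name]
  ring
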